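-- pv_equiv track=rewrite | github.com/akarande0906/leetcode75 | bit_manipulation/max_xor.py | getMaxXor
-- ===== SOURCE A (Python) =====
-- def getMaxXor(nums: list[int], maxBit: int) -> list[int]:
--     xor = 0
--     for n in nums:
--         xor ^= n
--     mask = (1 << maxBit) - 1
--     answer = []
--     for n in reversed(nums):
--         answer.append(xor ^ mask)
--         xor ^= n
--     return answer
-- ===== SOURCE B (Python) =====
-- def getMaxXor(nums: list[int], maxBit: int) -> list[int]:
--     n = len(nums)
--     prefix = [0] * (n + 1)
--     for i in range(n):
--         prefix[i + 1] = prefix[i] ^ nums[i]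
--     mask = (1 << maxBit) - 1
--     return [prefix[k] ^ mask for k in range(n, 0, -1)]
-- ===== Notes on version B (the rewrite author's own statement) =====
-- stated objective: alternative
-- what changed: B materializes an explicit prefix-XOR table in a forward pass and emits the answer by indexing that table with a reverse range, instead of A's single running accumulator that is decremented while emitting.
import Mathlib
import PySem

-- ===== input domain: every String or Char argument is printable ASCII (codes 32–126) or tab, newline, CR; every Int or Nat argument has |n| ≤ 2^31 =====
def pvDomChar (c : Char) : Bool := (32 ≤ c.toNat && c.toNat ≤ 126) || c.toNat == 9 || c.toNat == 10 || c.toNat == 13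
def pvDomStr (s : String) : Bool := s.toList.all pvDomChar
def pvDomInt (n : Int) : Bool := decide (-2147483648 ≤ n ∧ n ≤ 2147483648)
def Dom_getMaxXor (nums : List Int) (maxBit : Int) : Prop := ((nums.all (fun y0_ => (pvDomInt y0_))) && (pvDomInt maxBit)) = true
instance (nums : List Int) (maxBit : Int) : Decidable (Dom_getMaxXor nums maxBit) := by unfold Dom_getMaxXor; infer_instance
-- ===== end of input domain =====

-- B replaces A's single running XOR accumulator (decremented while emitting) by an explicit
-- prefix-XOR table built in a forward pass and indexed by a reverse range (objective: alternative).

-- ===== PORT A =====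
def getMaxXor (nums : List Int) (maxBit : Int) : List Int :=
  let x := nums.foldl (fun a n => PySem.Int.bxor a n) 0
  let mask := (1 : Int) <<< maxBit.toNat - 1
  (nums.reverse.foldl
    (fun (st : List Int × Int) n => (st.1 ++ [PySem.Int.bxor st.2 mask], PySem.Int.bxor st.2 n))
    (([] : List Int), x)).1

-- ===== PORT B =====
-- prefix[i+1] = prefix[i] ^ nums[i]; the element written last (index i) is prefix[i]
def pvBuildPrefix (nums : List Int) : List Int :=
  nums.foldl (fun p v => p ++ [PySem.Int.bxor (PySem.List.pyGetD p (-1) 0) v]) [0]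

def getMaxXor_alt (nums : List Int) (maxBit : Int) : List Int :=
  let n : Int := nums.length
  let pfx := pvBuildPrefix nums
  let mask := (1 : Int) <<< maxBit.toNat - 1
  (PySem.List.pyRange n 0 (-1)).map (fun k => PySem.Int.bxor (PySem.List.pyGetD pfx k 0) mask)

-- ===== PRECONDITION & SPEC =====
-- A raises ValueError on a negative shift count (1 << maxBit with maxBit < 0): excluded.
def Pre_getMaxXor (nums : List Int) (maxBit : Int) : Prop := 0 ≤ maxBit
instance (nums : List Int) (maxBit : Int) : Decidable (Pre_getMaxXor nums maxBit) := by unfold Pre_getMaxXor; infer_instance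
def pvWitness_getMaxXor : List Int × Int := ([3, 1, 2], 2)

def Spec_getMaxXor (nums : List Int) (maxBit : Int) (out : List Int) : Prop := out = getMaxXor_alt nums maxBit
instance (nums : List Int) (maxBit : Int) (out : List Int) : Decidable (Spec_getMaxXor nums maxBit out) := by unfold Spec_getMaxXor; infer_instance

-- ===== CLAIM (what is proved, stated in full; the proofs are below) =====
def Claim_equal_getMaxXor : Prop := ∀ (nums : List Int) (maxBit : Int), Dom_getMaxXor nums maxBit → Pre_getMaxXor nums maxBit → Spec_getMaxXor nums maxBit (getMaxXor nums maxBit)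

-- ===== LEMMAS AND PROOFS =====

-- XOR cancellation used to run A's emission loop backwards
theorem pvBxorCancel (p x : Int) : PySem.Int.bxor (PySem.Int.bxor p x) x = p := by
  unfold PySem.Int.bxor
  by_cases hp : 0 ≤ p <;> by_cases hx : 0 ≤ x <;> simp only [hp, hx, if_true, if_false] <;> split_ifs <;>
    first
    | omega
    | (simp only [show ∀ c : Int, -(-c - 1) - 1 = c from fun c => by ring,
        Int.toNat_natCast, Nat.xor_xor_cancel_right]; omega)

-- A's emission loop, characterized by right induction
theorem pvLoopA (mask : Int) (l acc : List Int) :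
    (l.reverse.foldl
      (fun (st : List Int × Int) n => (st.1 ++ [PySem.Int.bxor st.2 mask], PySem.Int.bxor st.2 n))
      (acc, l.foldl (fun a n => PySem.Int.bxor a n) 0)).1
    = acc ++ ((List.range l.length).map
        (fun k => PySem.Int.bxor ((l.take (k+1)).foldl (fun a n => PySem.Int.bxor a n) 0) mask)).reverse := by
  induction l using List.reverseRecOn generalizing acc with
  | nil => simp
  | append_singleton l x ih =>
    rw [List.reverse_append]
    simp only [List.reverse_singleton, List.singleton_append, List.foldl_cons,
      List.foldl_append, List.foldl_nil]
    rw [pvBxorCancel, ih]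
    have hmapcast :
        (List.range l.length).map
            (fun k => PySem.Int.bxor (((l ++ [x]).take (k+1)).foldl (fun a n => PySem.Int.bxor a n) 0) mask)
          = (List.range l.length).map
            (fun k => PySem.Int.bxor ((l.take (k+1)).foldl (fun a n => PySem.Int.bxor a n) 0) mask) := by
      apply List.map_congr_left
      intro k hk
      rw [List.mem_range] at hk
      rw [List.take_append_of_le_length (by omega)]
    rw [List.length_append, List.length_singleton, List.range_succ, List.map_append,
      List.reverse_append, hmapcast]
    simp only [List.map_cons, List.map_nil, List.reverse_singleton, List.singleton_append]
    rw [List.take_of_length_le (by simp), List.foldl_append]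
    simp [List.append_assoc]

-- The prefix table equals the list of prefix XORs
theorem pvBuildPrefix_eq (l : List Int) :
    pvBuildPrefix l
      = (List.range (l.length + 1)).map
          (fun k => (l.take k).foldl (fun a n => PySem.Int.bxor a n) 0) := by
  induction l using List.reverseRecOn with
  | nil => simp [pvBuildPrefix]
  | append_singleton l x ih =>
    unfold pvBuildPrefix at *
    rw [List.foldl_append, ih]
    simp only [List.foldl_cons, List.foldl_nil]
    have hmapcast :
        (List.range (l.length + 1)).map
            (fun k => ((l ++ [x]).take k).foldl (fun a n => PySem.Int.bxor a n) 0)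
          = (List.range (l.length + 1)).map
            (fun k => (l.take k).foldl (fun a n => PySem.Int.bxor a n) 0) := by
      apply List.map_congr_left
      intro k hk
      rw [List.mem_range] at hk
      rw [List.take_append_of_le_length (by omega)]
    rw [List.length_append, List.length_singleton,
      show List.range (l.length + 1 + 1) = List.range (l.length + 1) ++ [l.length + 1] from
        List.range_succ, List.map_append, hmapcast]
    simp only [List.map_cons, List.map_nil]
    rw [List.take_of_length_le (by simp), List.foldl_append]
    simp only [List.foldl_cons, List.foldl_nil]
    congr 3
    rw [show List.range (l.length + 1) = List.range l.length ++ [l.length] from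
      List.range_succ, List.map_append]
    simp only [List.map_cons, List.map_nil]
    rw [PySem.List.pyGetD_neg_one_append_singleton, List.take_length]

-- ===== VERDICT (by name: the statement is the Claim_ definition above) =====
theorem getMaxXor_spec : Claim_equal_getMaxXor := by
  intro nums maxBit _ _
  unfold Spec_getMaxXor getMaxXor getMaxXor_alt
  simp only
  rw [pvLoopA, List.nil_append, pvBuildPrefix_eq, PySem.List.pyRange_neg_one,
    List.map_map]
  set mask := (1 : Int) <<< maxBit.toNat - 1 with hmask
  set n := nums.length with hn
  apply List.ext_getElem
  · simp
  · intro j h1 h2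
    simp only [List.length_reverse, List.length_map, List.length_range] at h1 h2
    rw [List.getElem_reverse, List.getElem_map, List.getElem_range,
      List.getElem_map, List.getElem_range]
    simp only [Function.comp_apply, List.length_map, List.length_range]
    have h1' : j < n := by omega
    have hidx : ((n : Int) - (j : Int)) = ((n - j : Nat) : Int) := by
      push_cast [Nat.cast_sub (le_of_lt h1')]; ring
    rw [hidx, PySem.List.pyGetD_natCast]
    have hlt : n - j < n + 1 := by omega
    rw [List.getD_eq_getElem?_getD, List.getElem?_map, List.getElem?_range hlt]
    simp only [Option.map_some, Option.getD_some]
    have : n - 1 - j + 1 = n - j := by omega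
    rw [this]
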